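-- pv_equiv track=rewrite | github.com/tiffanalin/dashboardteam5 | functions.py | get_multiplicity_counts
-- ===== SOURCE A (Python) =====
-- def get_multiplicity_counts(number_list):
--     counts = {}
--     for number in number_list:
--         if number in counts:
--             counts[number] += 1
--         else:
--             counts[number] = 1
--     max_count = max(counts.values())
--     return 10**(max_count - 1) if max_count > 1 else 1
-- ===== SOURCE B (Python) =====
-- def get_multiplicity_counts(number_list):
--     best = 0
--     run = 0
--     prev = None
--     for x in sorted(number_list):
--         run = run + 1 if prev == x else 1
--         prev = x
--         best = max(best, run)
--     return 10 ** (best - 1) if best > 1 else 1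
-- ===== Notes on version B (the rewrite author's own statement) =====
-- stated objective: alternative
-- what changed: Replaces the hash-map frequency dictionary with sort-then-scan: sort the list and track the current and maximal run length of equal consecutive elements in one linear pass, with no dictionary at all; Pre_ excludes only the empty list, on which A's max() raises ValueError.
import Mathlib
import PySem

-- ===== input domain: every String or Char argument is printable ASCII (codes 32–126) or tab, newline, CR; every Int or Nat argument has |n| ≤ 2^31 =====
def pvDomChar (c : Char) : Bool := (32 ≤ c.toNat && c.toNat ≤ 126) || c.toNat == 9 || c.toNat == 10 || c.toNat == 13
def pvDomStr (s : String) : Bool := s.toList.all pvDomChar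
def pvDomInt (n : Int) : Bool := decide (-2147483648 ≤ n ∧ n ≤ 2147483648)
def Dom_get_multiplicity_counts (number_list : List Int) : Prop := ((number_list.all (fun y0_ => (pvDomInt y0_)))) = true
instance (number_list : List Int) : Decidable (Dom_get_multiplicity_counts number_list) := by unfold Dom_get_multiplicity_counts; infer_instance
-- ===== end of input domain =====

-- B replaces A's hash-map frequency counting by a sort-then-run-length scan (alternative algorithm, no dict).

-- ===== PORT A =====
def get_multiplicity_counts (number_list : List Int) : Int :=
  let counts := number_list.foldl
    (fun (d : PySem.Dict Int Int) x =>
      if d.contains x then d.insert x (d.getD x 0 + 1) else d.insert x 1)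
    PySem.Dict.empty
  -- max(counts.values()): Python raises ValueError on the empty list; Pre_ excludes it, so the getD 0 default is never reached
  let max_count := (PySem.List.max? counts.values (fun y => y)).getD 0
  if max_count > 1 then 10 ^ (max_count - 1).toNat else 1

-- ===== PORT B =====
def get_multiplicity_counts_alt (number_list : List Int) : Int :=
  let res := (PySem.List.sorted number_list (fun x => x) false).foldl
    (fun (st : Int × Int × Option Int) x =>
      let run : Int := if st.2.2 = some x then st.2.1 + 1 else 1
      (max st.1 run, run, some x))
    (0, 0, none)
  if res.1 > 1 then 10 ^ (res.1 - 1).toNat else 1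

-- ===== PRECONDITION & SPEC =====
-- Pre_ excludes exactly the empty list, on which Python A's max() raises ValueError.
def Pre_get_multiplicity_counts (number_list : List Int) : Prop := number_list ≠ []
instance (number_list : List Int) : Decidable (Pre_get_multiplicity_counts number_list) := by unfold Pre_get_multiplicity_counts; infer_instance
def pvWitness_get_multiplicity_counts : List Int := [3, 1, 3]

def Spec_get_multiplicity_counts (number_list : List Int) (out : Int) : Prop := out = get_multiplicity_counts_alt number_list
instance (number_list : List Int) (out : Int) : Decidable (Spec_get_multiplicity_counts number_list out) := by unfold Spec_get_multiplicity_counts; infer_instance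

-- ===== CLAIM (what is proved, stated in full; the proofs are below) =====
def Claim_equal_get_multiplicity_counts : Prop := ∀ (number_list : List Int), Dom_get_multiplicity_counts number_list → Pre_get_multiplicity_counts number_list → Spec_get_multiplicity_counts number_list (get_multiplicity_counts number_list)

-- ===== LEMMAS AND PROOFS =====

-- "m is the maximal multiplicity of an element of l"
def IsMaxCount (l : List Int) (m : Int) : Prop :=
  (∃ y ∈ l, (l.count y : Int) = m) ∧ ∀ y ∈ l, (l.count y : Int) ≤ m

theorem isMaxCount_unique {l : List Int} {m m' : Int}
    (h : IsMaxCount l m) (h' : IsMaxCount l m') : m = m' := by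
  obtain ⟨⟨y, hy, hym⟩, hub⟩ := h
  obtain ⟨⟨y', hy', hym'⟩, hub'⟩ := h'
  have h1 := hub' y hy
  have h2 := hub y' hy'
  omega

theorem isMaxCount_perm {l l' : List Int} {m : Int} (hp : l.Perm l')
    (h : IsMaxCount l m) : IsMaxCount l' m := by
  obtain ⟨⟨y, hy, hym⟩, hub⟩ := h
  refine ⟨⟨y, hp.mem_iff.mp hy, by rw [← hp.count_eq]; exact hym⟩, ?_⟩
  intro z hz
  rw [← hp.count_eq]
  exact hub z (hp.mem_iff.mpr hz)

-- A-side: the branching counting loop is the canonical counter loop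
theorem branch_fold_eq_counter (l : List Int) :
    l.foldl (fun (d : PySem.Dict Int Int) x =>
      if d.contains x then d.insert x (d.getD x 0 + 1) else d.insert x 1) PySem.Dict.empty
    = PySem.Dict.counter l := by
  have hf : (fun (d : PySem.Dict Int Int) x =>
      if d.contains x then d.insert x (d.getD x 0 + 1) else d.insert x 1)
      = fun (d : PySem.Dict Int Int) x => d.insert x (d.getD x 0 + 1) := by
    funext d x
    by_cases h : d.contains x
    · simp [h]
    · have h0 : d.getD x 0 = 0 :=
        PySem.Dict.getD_of_not_contains d 0 (by simpa using h)
      simp [h, h0]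
  rw [hf, PySem.Dict.foldl_insert_getD_add_one_eq_counter]

theorem counter_max_isMaxCount (l : List Int) (hne : l ≠ []) :
    IsMaxCount l (((PySem.List.max? (PySem.Dict.counter l).values (fun y => y)).getD 0)) := by
  have hvals : (PySem.Dict.counter l).values
      = (PySem.Set.ofList l).map (fun k => (l.count k : Int)) := by
    show ((PySem.Dict.counter l).items).map (·.2) = _
    rw [PySem.Dict.items_counter]
    simp
  have hvne : (PySem.Dict.counter l).values ≠ [] := by
    rw [hvals]
    simp only [ne_eq, List.map_eq_nil_iff]
    intro h
    rcases List.exists_mem_of_ne_nil l hne with ⟨x, hx⟩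
    have hx' : x ∈ PySem.Set.ofList l := (PySem.Set.mem_ofList _ _).mpr hx
    rw [h] at hx'; simp at hx'
  obtain ⟨m, hm⟩ : ∃ m, PySem.List.max? (PySem.Dict.counter l).values (fun y => y) = some m := by
    rcases h : PySem.List.max? (PySem.Dict.counter l).values (fun y => y) with _ | m
    · exact absurd ((PySem.List.max?_eq_none_iff _ _).mp h) hvne
    · exact ⟨m, rfl⟩
  rw [hm]
  have hmem := PySem.List.max?_mem hm
  have hmax := PySem.List.max?_isMax hm
  rw [hvals] at hmem hmax
  simp only [List.mem_map] at hmem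
  obtain ⟨k, hk, hkm⟩ := hmem
  constructor
  · exact ⟨k, (PySem.Set.mem_ofList _ _).mp hk, by simpa using hkm⟩
  · intro y hy
    have h2 := hmax (l.count y : Int) (List.mem_map.mpr ⟨y, (PySem.Set.mem_ofList _ _).mpr hy, rfl⟩)
    simpa using h2

-- in a ≤-sorted list every element is at most the last one
theorem le_getLast_of_pairwise (p : List Int) (hp : p.Pairwise (· ≤ ·)) (z : Int)
    (hz : p.getLast? = some z) : ∀ a ∈ p, a ≤ z := by
  obtain ⟨q, rfl⟩ := List.getLast?_eq_some_iff.mp hz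
  intro a ha
  rcases List.mem_append.mp ha with h | h
  · exact (List.pairwise_append.mp hp).2.2 a h z (by simp)
  · simp at h; omega

-- B-side invariant: after scanning a sorted list, the run is the count of the last
-- element and the best is the maximal multiplicity
theorem scan_invariant (s : List Int) (hs : s.Pairwise (· ≤ ·)) (hne : s ≠ []) :
    ∃ b z, s.foldl
      (fun (st : Int × Int × Option Int) x =>
        let run : Int := if st.2.2 = some x then st.2.1 + 1 else 1
        (max st.1 run, run, some x)) (0, 0, none)
      = (b, (s.count z : Int), some z) ∧ s.getLast? = some z ∧ IsMaxCount s b := by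
  induction s using List.reverseRecOn with
  | nil => exact absurd rfl hne
  | append_singleton p y ih =>
    rcases eq_or_ne p [] with hp | hp
    · subst hp
      refine ⟨1, y, by simp [List.foldl], rfl, ⟨y, by simp, by simp⟩, ?_⟩
      intro w hw; simp at hw; subst hw; simp
    · have hps : p.Pairwise (· ≤ ·) := (List.pairwise_append.mp hs).1
      have hle : ∀ a ∈ p, a ≤ y := fun a ha =>
        (List.pairwise_append.mp hs).2.2 a ha y (by simp)
      obtain ⟨b, z, hfold, hlast, hmaxp⟩ := ih hps hp
      have hzp : z ∈ p := List.mem_of_getLast? hlast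
      have hzle : ∀ a ∈ p, a ≤ z := le_getLast_of_pairwise p hps z hlast
      have hb1 : 1 ≤ b := by
        obtain ⟨⟨w, hw, hwb⟩, _⟩ := hmaxp
        have := List.count_pos_iff.mpr hw
        omega
      rw [List.foldl_append, hfold]
      rcases eq_or_ne y z with hyz | hyz
      · -- y equals the last element: the run extends
        subst hyz
        refine ⟨max b ((p.count y : Int) + 1), y, ?_, List.getLast?_concat, ?_, ?_⟩
        · simp [List.count_append]
        · -- attained
          by_cases hbc : (p.count y : Int) + 1 ≤ b
          · obtain ⟨⟨w, hw, hwb⟩, _⟩ := hmaxp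
            have hwy : w ≠ y := by
              intro h; subst h; omega
            refine ⟨w, by simp [hw], ?_⟩
            have : (p ++ [y]).count w = p.count w := by
              simp [List.count_append, List.count_singleton, Ne.symm hwy]
            rw [this, hwb]
            omega
          · refine ⟨y, by simp, ?_⟩
            have : (p ++ [y]).count y = p.count y + 1 := by
              simp [List.count_append]
            rw [this]
            push_cast
            omega
        · -- upper bound
          intro w hw
          rcases eq_or_ne w y with hwy | hwy
          · subst hwy
            have : (p ++ [w]).count w = p.count w + 1 := by simp [List.count_append]
            rw [this]; push_cast; omega
          · have hwp : w ∈ p := by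
              rcases List.mem_append.mp hw with h | h
              · exact h
              · simp at h; exact absurd h hwy
            have : (p ++ [y]).count w = p.count w := by
              simp [List.count_append, List.count_singleton, Ne.symm hwy]
            rw [this]
            have := hmaxp.2 w hwp
            omega
      · -- y is a new, strictly larger element: a fresh run of length 1
        have hyny : y ∉ p := by
          intro hy
          have h1 := hzle y hy
          have h2 := hle z hzp
          omega
        have hsome : (some z = some y) = False := by
          simp; omega
        refine ⟨max b 1, y, ?_, List.getLast?_concat, ?_, ?_⟩
        · have : (p ++ [y]).count y = 1 := by
            simp [List.count_append, List.count_eq_zero_of_not_mem hyny]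
          rw [this]
          simp [hsome]
        · obtain ⟨⟨w, hw, hwb⟩, _⟩ := hmaxp
          have hwy : w ≠ y := fun h => hyny (h ▸ hw)
          refine ⟨w, by simp [hw], ?_⟩
          have : (p ++ [y]).count w = p.count w := by
            simp [List.count_append, List.count_singleton, Ne.symm hwy]
          rw [this, hwb]
          omega
        · intro w hw
          rcases eq_or_ne w y with hwy | hwy
          · subst hwy
            have : (p ++ [w]).count w = 1 := by
              simp [List.count_append, List.count_eq_zero_of_not_mem hyny]
            rw [this]; omega
          · have hwp : w ∈ p := by
              rcases List.mem_append.mp hw with h | h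
              · exact h
              · simp at h; exact absurd h hwy
            have : (p ++ [y]).count w = p.count w := by
              simp [List.count_append, List.count_singleton, Ne.symm hwy]
            rw [this]
            have := hmaxp.2 w hwp
            omega

-- ===== VERDICT (by name: the statement is the Claim_ definition above) =====
theorem get_multiplicity_counts_spec : Claim_equal_get_multiplicity_counts := by
  intro l _ hne
  unfold Spec_get_multiplicity_counts get_multiplicity_counts get_multiplicity_counts_alt
  have hA : IsMaxCount l ((PySem.List.max? (l.foldl
      (fun (d : PySem.Dict Int Int) x =>
        if d.contains x then d.insert x (d.getD x 0 + 1) else d.insert x 1)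
      PySem.Dict.empty).values (fun y => y)).getD 0) := by
    rw [branch_fold_eq_counter]
    exact counter_max_isMaxCount l hne
  have hsp : (PySem.List.sorted l (fun x => x) false).Perm l := PySem.List.sorted_perm l _ _
  have hsne : PySem.List.sorted l (fun x => x) false ≠ [] := by
    intro h
    exact hne ((PySem.List.sorted_eq_nil_iff _ _ _).mp h)
  obtain ⟨b, z, hfold, _, hmax⟩ :=
    scan_invariant (PySem.List.sorted l (fun x => x) false)
      (PySem.List.sorted_pairwise l _) hsne
  have hB : IsMaxCount l b := isMaxCount_perm hsp hmax
  have heq : (PySem.List.max? (l.foldl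
      (fun (d : PySem.Dict Int Int) x =>
        if d.contains x then d.insert x (d.getD x 0 + 1) else d.insert x 1)
      PySem.Dict.empty).values (fun y => y)).getD 0 = b := isMaxCount_unique hA hB
  simp only [hfold, heq]
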